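-- pv_equiv track=rewrite | github.com/GiliEliach/RAG | src/utils.py | fix_broken_sentences
-- ===== SOURCE A (Python) =====
-- def fix_broken_sentences(text: str) -> str:
--     lines = text.split('\n')
--     fixed_text = ""
--     for line in lines:
--         if line.endswith('-'):
--             fixed_text += line[:-1]
--         else:
--             fixed_text += line + ' '
--     return fixed_text.strip()
-- ===== SOURCE B (Python) =====
-- def fix_broken_sentences(text: str) -> str:
--     # whole-string substitution instead of a per-line loop:
--     # every '-\n' joins a hyphen-broken word; a trailing '-' on the final
--     # (newline-less) line is dropped too; remaining newlines become spaces.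
--     s = text.replace('-\n', '')
--     if text.endswith('-'):
--         s = s[:-1]
--     return s.replace('\n', ' ').strip()
-- ===== Notes on version B (the rewrite author's own statement) =====
-- stated objective: alternative
-- what changed: Replaces A's split-into-lines loop with accumulating concatenation by whole-string substitutions: delete each hyphen+newline pair, drop a single trailing hyphen, turn remaining newlines into spaces, then strip.
import Mathlib
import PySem

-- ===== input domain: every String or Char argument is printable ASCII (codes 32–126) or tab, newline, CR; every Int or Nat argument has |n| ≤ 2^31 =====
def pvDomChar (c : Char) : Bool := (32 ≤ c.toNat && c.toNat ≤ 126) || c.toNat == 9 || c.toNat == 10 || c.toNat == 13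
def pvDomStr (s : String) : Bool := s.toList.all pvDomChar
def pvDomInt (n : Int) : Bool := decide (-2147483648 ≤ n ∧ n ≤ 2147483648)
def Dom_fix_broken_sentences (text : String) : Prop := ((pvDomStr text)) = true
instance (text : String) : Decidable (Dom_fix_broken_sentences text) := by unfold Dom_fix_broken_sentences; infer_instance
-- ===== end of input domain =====

-- B replaces A's per-line loop by whole-string substitutions (remove '-\n', drop a lone
-- trailing '-', turn '\n' into ' ', strip); same return value on every input.

-- ===== PORT A =====
def fix_broken_sentences (text : String) : String :=
  let lines := PySem.Chars.splitOn text.toList ['\n']          -- text.split('\n')  (sep ≠ "")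
  let fixed := lines.foldl (fun acc line =>
    if PySem.Chars.endswith line ['-'] = true then
      acc ++ PySem.List.slice line none (some (-1))            -- fixed_text += line[:-1]
    else
      acc ++ line ++ [' ']) []                                 -- fixed_text += line + ' '
  String.ofList (PySem.Chars.strip fixed)                          -- fixed_text.strip()

-- ===== PORT B =====
def fix_broken_sentences_alt (text : String) : String :=
  let s0 := PySem.Chars.replace text.toList ['-', '\n'] []     -- s = text.replace('-\n', '')
  let s1 := if PySem.Chars.endswith text.toList ['-'] = true   -- if text.endswith('-'):
            then PySem.List.slice s0 none (some (-1))          --     s = s[:-1]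
            else s0
  String.ofList (PySem.Chars.strip (PySem.Chars.replace s1 ['\n'] [' ']))  -- s.replace('\n',' ').strip()

-- ===== PRECONDITION & SPEC =====
def Spec_fix_broken_sentences (text : String) (out : String) : Prop := out = fix_broken_sentences_alt text
instance (text : String) (out : String) : Decidable (Spec_fix_broken_sentences text out) := by unfold Spec_fix_broken_sentences; infer_instance

-- ===== CLAIM (what is proved, stated in full; the proofs are below) =====
def Claim_equal_fix_broken_sentences : Prop := ∀ (text : String), Dom_fix_broken_sentences text → Spec_fix_broken_sentences text (fix_broken_sentences text)

-- ===== LEMMAS AND PROOFS =====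

-- structural model of text.split('\n')
def pvS : List Char → List (List Char)
  | [] => [[]]
  | c :: t => if c = '\n' then [] :: pvS t
              else match pvS t with
                   | [] => [[c]]
                   | h :: r => (c :: h) :: r

-- structural model of text.replace('-\n', '')
def pvR1 : List Char → List Char
  | '-' :: '\n' :: t => pvR1 t
  | c :: t => c :: pvR1 t
  | [] => []

-- the character map behind .replace('\n', ' ')
def pvNl (c : Char) : Char := if c = '\n' then ' ' else c

-- A's loop body, joined over the split pieces
def pvJoin : List (List Char) → List Char
  | [] => []
  | l :: ls => (if PySem.Chars.endswith l ['-'] = true then l.dropLast else l ++ [' ']) ++ pvJoin ls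

def pvCons (p : List Char) : List (List Char) → List (List Char)
  | [] => [p]
  | h :: r => (p ++ h) :: r

lemma pvS_ne_nil (cs : List Char) : pvS cs ≠ [] := by
  cases cs with
  | nil => simp [pvS]
  | cons c t =>
    simp only [pvS]
    split
    · simp
    · split <;> simp

lemma splitOn_go (fuel : Nat) : ∀ (l cur : List Char) (accs : List (List Char)),
    l.length ≤ fuel →
    PySem.Chars.splitOn.go ['\n'] fuel l cur accs = accs.reverse ++ pvCons cur.reverse (pvS l) := by
  induction fuel with
  | zero =>
    intro l cur accs h
    have : l = [] := List.length_eq_zero_iff.mp (Nat.le_zero.mp h)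
    subst this
    simp [PySem.Chars.splitOn.go, pvS, pvCons]
  | succ n ih =>
    intro l cur accs h
    cases l with
    | nil => simp [PySem.Chars.splitOn.go, pvS, pvCons]
    | cons c rest =>
      simp only [PySem.Chars.splitOn.go]
      by_cases hc : c = '\n'
      · subst hc
        rw [if_pos (by simp [List.isPrefixOf])]
        simp only [List.length_cons, List.length_nil, List.drop_succ_cons, List.drop_zero]
        rw [ih rest [] (cur.reverse :: accs) (by simpa using h)]
        cases hS : pvS rest with
        | nil => exact absurd hS (pvS_ne_nil rest)
        | cons h0 r0 => simp [pvS, pvCons, hS]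
      · rw [if_neg (by simp [List.isPrefixOf]; exact fun e => absurd e.symm hc)]
        rw [ih rest (c :: cur) accs (by simpa using h)]
        cases hS : pvS rest with
        | nil => exact absurd hS (pvS_ne_nil rest)
        | cons h0 r0 => simp [pvS, pvCons, hS, hc]

lemma splitOn_eq (cs : List Char) : PySem.Chars.splitOn cs ['\n'] = pvS cs := by
  rw [PySem.Chars.splitOn, splitOn_go (cs.length + 1) cs [] [] (by omega)]
  cases hS : pvS cs with
  | nil => exact absurd hS (pvS_ne_nil cs)
  | cons h0 r0 => simp [pvCons]

lemma replace_go1 (fuel : Nat) : ∀ (l acc : List Char), l.length ≤ fuel →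
    PySem.Chars.replace.go ['-', '\n'] [] fuel l acc = acc.reverse ++ pvR1 l := by
  induction fuel with
  | zero =>
    intro l acc h
    have : l = [] := List.length_eq_zero_iff.mp (Nat.le_zero.mp h)
    subst this; simp [PySem.Chars.replace.go, pvR1]
  | succ n ih =>
    intro l acc h
    cases l with
    | nil => simp [PySem.Chars.replace.go, pvR1]
    | cons c rest =>
      simp only [PySem.Chars.replace.go]
      by_cases hp : ['-', '\n'].isPrefixOf (c :: rest) = true
      · rw [if_pos hp]
        obtain ⟨c2, rest2, rfl⟩ : ∃ c2 rest2, rest = c2 :: rest2 := by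
          cases rest with
          | nil => simp [List.isPrefixOf] at hp
          | cons a b => exact ⟨a, b, rfl⟩
        simp only [List.isPrefixOf, Bool.and_eq_true, beq_iff_eq] at hp
        obtain ⟨h1, h2, -⟩ := hp
        subst h1; subst h2
        simp only [List.length_cons, List.length_nil, List.drop_succ_cons, List.drop_zero,
          List.reverse_nil, List.nil_append]
        rw [ih rest2 acc (by simp at h; omega)]
        simp [pvR1]
      · rw [if_neg hp]
        rw [ih rest (c :: acc) (by simpa using h)]
        have hr : pvR1 (c :: rest) = c :: pvR1 rest := by
          cases rest with
          | nil => simp [pvR1]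
          | cons c2 rest2 =>
            by_cases hc : c = '-'
            · subst hc
              have h2 : ¬ c2 = '\n' := by
                intro e; subst e; simp [List.isPrefixOf] at hp
              simp [pvR1, h2]
            · simp [pvR1, hc]
        simp [hr]

lemma replace_eq1 (cs : List Char) : PySem.Chars.replace cs ['-', '\n'] [] = pvR1 cs := by
  rw [PySem.Chars.replace]
  simp only [List.isEmpty_cons, if_false, Bool.false_eq_true]
  exact replace_go1 cs.length cs [] le_rfl

lemma replace_go2 (fuel : Nat) : ∀ (l acc : List Char), l.length ≤ fuel →
    PySem.Chars.replace.go ['\n'] [' '] fuel l acc = acc.reverse ++ l.map pvNl := by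
  induction fuel with
  | zero =>
    intro l acc h
    have : l = [] := List.length_eq_zero_iff.mp (Nat.le_zero.mp h)
    subst this; simp [PySem.Chars.replace.go]
  | succ n ih =>
    intro l acc h
    cases l with
    | nil => simp [PySem.Chars.replace.go]
    | cons c rest =>
      simp only [PySem.Chars.replace.go]
      by_cases hc : c = '\n'
      · subst hc
        rw [if_pos (by simp [List.isPrefixOf])]
        simp only [List.length_cons, List.length_nil, List.drop_succ_cons, List.drop_zero]
        rw [ih rest ([' '].reverse ++ acc) (by simpa using h)]
        simp [pvNl]
      · rw [if_neg (by simp [List.isPrefixOf]; exact fun e => absurd e.symm hc)]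
        rw [ih rest (c :: acc) (by simpa using h)]
        simp [pvNl, hc]

lemma replace_eq2 (cs : List Char) : PySem.Chars.replace cs ['\n'] [' '] = cs.map pvNl := by
  rw [PySem.Chars.replace]
  simp only [List.isEmpty_cons, if_false, Bool.false_eq_true]
  exact replace_go2 cs.length cs [] le_rfl

-- endswith '-' on small shapes
lemma end_nil : PySem.Chars.endswith [] ['-'] = false := by decide

lemma end_single (c : Char) : PySem.Chars.endswith [c] ['-'] = (c == '-') := by
  simp [PySem.Chars.endswith, List.isSuffixOf, List.isPrefixOf, BEq.comm]

lemma end_cons (c : Char) {t : List Char} (h : t ≠ []) :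
    PySem.Chars.endswith (c :: t) ['-'] = PySem.Chars.endswith t ['-'] := by
  rw [Bool.eq_iff_iff, PySem.Chars.endswith_iff, PySem.Chars.endswith_iff, List.suffix_cons_iff]
  constructor
  · rintro (h1 | h1)
    · cases t <;> simp_all
    · exact h1
  · exact Or.inr

-- a trailing '-' survives text.replace('-\n', '')
lemma pvR1_ne_nil : ∀ n (cs : List Char), cs.length ≤ n →
    PySem.Chars.endswith cs ['-'] = true → pvR1 cs ≠ [] := by
  intro n
  induction n with
  | zero =>
    intro cs h hE
    have : cs = [] := List.length_eq_zero_iff.mp (Nat.le_zero.mp h)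
    subst this; simp [end_nil] at hE
  | succ n ih =>
    intro cs h hE
    cases cs with
    | nil => simp [end_nil] at hE
    | cons c t =>
      cases t with
      | nil =>
        rw [end_single] at hE
        simp [pvR1, (beq_iff_eq.mp hE)]
      | cons c2 t2 =>
        by_cases hp : c = '-' ∧ c2 = '\n'
        · obtain ⟨rfl, rfl⟩ := hp
          have hR : pvR1 ('-' :: '\n' :: t2) = pvR1 t2 := by simp [pvR1]
          rw [hR]
          cases t2 with
          | nil => revert hE; decide
          | cons c3 t3 =>
            rw [end_cons _ (by simp), end_cons _ (by simp)] at hE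
            exact ih _ (by simp at h ⊢; omega) hE
        · have hr : pvR1 (c :: c2 :: t2) = c :: pvR1 (c2 :: t2) := by
            by_cases hc : c = '-'
            · subst hc
              have h2 : ¬ c2 = '\n' := fun e => hp ⟨rfl, e⟩
              simp [pvR1, h2]
            · simp [pvR1, hc]
          simp [hr]

-- one char of pvS peeled off (generic head)
lemma pvJoin_cons (c : Char) (t : List Char) (hc : c ≠ '\n')
    (h2 : c = '-' → t ≠ [] ∧ t.head? ≠ some '\n') :
    pvJoin (pvS (c :: t)) = c :: pvJoin (pvS t) := by
  cases t with
  | nil =>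
    have hcm : ¬ c = '-' := fun e => (h2 e).1 rfl
    simp [pvS, pvJoin, hc, end_single, end_nil, hcm]
  | cons c2 t2 =>
    by_cases hc2 : c2 = '\n'
    · subst hc2
      have hcm : ¬ c = '-' := fun e => (h2 e).2 (by simp)
      simp [pvS, pvJoin, hc, end_single, end_nil, hcm]
    · obtain ⟨h0, r0, hS⟩ : ∃ h0 r0, pvS (c2 :: t2) = (c2 :: h0) :: r0 := by
        simp only [pvS, if_neg hc2]
        cases hS2 : pvS t2 with
        | nil => exact absurd hS2 (pvS_ne_nil t2)
        | cons a b => exact ⟨a, b, rfl⟩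
      have hS' : pvS (c :: c2 :: t2) = (c :: c2 :: h0) :: r0 := by
        conv_lhs => rw [pvS]
        rw [if_neg hc, hS]
      rw [hS', hS]
      simp only [pvJoin]
      rw [end_cons c (t := c2 :: h0) (by simp), List.dropLast_cons_of_ne_nil (by simp)]
      split <;> simp

-- isspace facts used by the strip lemmas
lemma isspace_space : PySem.Chars.isspace ' ' = true := by decide

lemma rstrip_append_space (y : List Char) :
    PySem.Chars.rstrip (y ++ [' ']) = PySem.Chars.rstrip y := by
  simp [PySem.Chars.rstrip, isspace_space]

lemma strip_append_space (x : List Char) :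
    PySem.Chars.strip (x ++ [' ']) = PySem.Chars.strip x := by
  simp only [PySem.Chars.strip, PySem.Chars.lstrip, List.dropWhile_append]
  split
  · next hemp =>
    simp only [List.isEmpty_iff] at hemp
    rw [hemp]
    simp [PySem.Chars.rstrip, isspace_space]
  · exact rstrip_append_space _

-- THE CORE: A's joined loop output vs B's substitution pipeline (up to one trailing space)
lemma pv_main : ∀ n (cs : List Char), cs.length ≤ n →
    pvJoin (pvS cs) =
      (if PySem.Chars.endswith cs ['-'] = true
        then (pvR1 cs).dropLast else pvR1 cs).map pvNl
      ++ (if PySem.Chars.endswith cs ['-'] = true then [] else [' ']) := by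
  intro n
  induction n with
  | zero =>
    intro cs h
    have : cs = [] := List.length_eq_zero_iff.mp (Nat.le_zero.mp h)
    subst this; decide
  | succ n ih =>
    intro cs h
    cases cs with
    | nil => decide
    | cons c t =>
      by_cases hpair : c = '-' ∧ t.head? = some '\n'
      · -- cs = '-' :: '\n' :: t2 : the pair disappears on both sides
        obtain ⟨rfl, hh⟩ := hpair
        obtain ⟨t2, rfl⟩ : ∃ t2, t = '\n' :: t2 := by
          cases t with
          | nil => simp at hh
          | cons a b => simp at hh; exact ⟨b, by rw [hh]⟩
        have hR : pvR1 ('-' :: '\n' :: t2) = pvR1 t2 := by simp [pvR1]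
        have hS : pvS ('-' :: '\n' :: t2) = ['-'] :: pvS t2 := by
          simp [pvS]
        have hE : PySem.Chars.endswith ('-' :: '\n' :: t2) ['-']
                = PySem.Chars.endswith t2 ['-'] := by
          cases t2 with
          | nil => decide
          | cons a b => rw [end_cons _ (by simp), end_cons _ (by simp)]
        rw [hS, hR, hE]
        simp only [pvJoin]
        rw [show PySem.Chars.endswith ['-'] ['-'] = true by decide]
        simp only [if_true, show (['-'] : List Char).dropLast = [] from rfl, List.nil_append]
        exact ih t2 (by simp at h ⊢; omega)
      · by_cases hc : c = '\n'
        · -- a plain newline becomes a space on both sides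
          subst hc
          have hR : pvR1 ('\n' :: t) = '\n' :: pvR1 t := by simp [pvR1]
          have hE : PySem.Chars.endswith ('\n' :: t) ['-']
                  = PySem.Chars.endswith t ['-'] := by
            cases t with
            | nil => decide
            | cons a b => rw [end_cons _ (by simp)]
          rw [hR, hE]
          have hS : pvS ('\n' :: t) = [] :: pvS t := by simp [pvS]
          rw [hS]
          simp only [pvJoin, end_nil]
          rw [ih t (by simpa using h)]
          by_cases hEt : PySem.Chars.endswith t ['-'] = true
          · rw [List.dropLast_cons_of_ne_nil (pvR1_ne_nil t.length t le_rfl hEt)]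
            simp [hEt, pvNl]
          · simp [hEt, pvNl]
        · -- any other character is copied on both sides
          have hR : pvR1 (c :: t) = c :: pvR1 t := by
            cases t with
            | nil => simp [pvR1]
            | cons c2 t2 =>
              by_cases hcm : c = '-'
              · subst hcm
                have h2 : ¬ c2 = '\n' := fun e => hpair ⟨rfl, by simp [e]⟩
                simp [pvR1, h2]
              · simp [pvR1, hcm]
          cases t with
          | nil =>
            by_cases hcm : c = '-'
            · subst hcm; decide
            · rw [pvJoin_cons c [] hc (fun e => absurd e hcm), hR]
              rw [end_single]
              simp [pvJoin, pvS, pvR1, end_nil, hcm, pvNl, hc]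
          | cons c2 t2 =>
            have hE : PySem.Chars.endswith (c :: c2 :: t2) ['-']
                    = PySem.Chars.endswith (c2 :: t2) ['-'] := end_cons _ (by simp)
            rw [pvJoin_cons c (c2 :: t2) hc
                (fun e => ⟨by simp, fun hh => hpair ⟨e, hh⟩⟩), hR, hE]
            rw [ih (c2 :: t2) (by simpa using h)]
            by_cases hEt : PySem.Chars.endswith (c2 :: t2) ['-'] = true
            · rw [if_pos hEt, if_pos hEt,
                List.dropLast_cons_of_ne_nil (pvR1_ne_nil _ _ le_rfl hEt)]
              simp [pvNl, hc, hEt]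
            · simp [hEt, pvNl, hc]

-- A's foldl over the lines is pvJoin
lemma foldl_pvJoin : ∀ (ls : List (List Char)) (acc : List Char),
    ls.foldl (fun acc line =>
      if PySem.Chars.endswith line ['-'] = true then
        acc ++ PySem.List.slice line none (some (-1))
      else acc ++ line ++ [' ']) acc = acc ++ pvJoin ls := by
  intro ls
  induction ls with
  | nil => intro acc; simp [pvJoin]
  | cons l ls ih =>
    intro acc
    rw [List.foldl_cons]
    simp only [pvJoin]
    split
    · rw [ih]
      simp [PySem.List.slice_to_neg_one]
    · rw [ih]
      simp

-- ===== VERDICT (by name: the statement is the Claim_ definition above) =====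
theorem fix_broken_sentences_spec : Claim_equal_fix_broken_sentences := by
  intro text _
  unfold Spec_fix_broken_sentences fix_broken_sentences fix_broken_sentences_alt
  simp only [splitOn_eq, replace_eq1]
  rw [foldl_pvJoin, List.nil_append, pv_main text.toList.length text.toList le_rfl]
  by_cases hE : PySem.Chars.endswith text.toList ['-'] = true
  · rw [if_pos hE, if_pos hE, if_pos hE, PySem.List.slice_to_neg_one, replace_eq2,
      List.append_nil]
  · rw [if_neg hE, if_neg hE, if_neg hE, replace_eq2, strip_append_space]
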